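-- pv_equiv track=rewrite | github.com/im1-pro/GUI-Based-RSM | rstools.py | smallestindex
-- ===== SOURCE A (Python) =====
-- def smallestindex(a):#for nx1 matrix
--     b = []
--     for i in a:
--         b.append(min(i))
--     k = 0
--     for j in b:
--         if j==min(b):
--             break
--         k = k + 1
--     return k
-- ===== SOURCE B (Python) =====
-- def smallestindex(a):  # for nx1 matrix
--     best_idx = 0
--     best_val = None
--     for i, row in enumerate(a):
--         m = min(row)
--         if best_val is None or m < best_val:
--             best_val = m
--             best_idx = i
--     return best_idx
-- ===== Notes on version B (the rewrite author's own statement) =====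
-- stated objective: simpler
-- what changed: Replaces the build-minima-list-then-rescan-with-min(b)-per-element structure by one enumerate pass keeping a running minimum and its first index, with no intermediate list and no repeated min(b) scan.
import Mathlib
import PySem

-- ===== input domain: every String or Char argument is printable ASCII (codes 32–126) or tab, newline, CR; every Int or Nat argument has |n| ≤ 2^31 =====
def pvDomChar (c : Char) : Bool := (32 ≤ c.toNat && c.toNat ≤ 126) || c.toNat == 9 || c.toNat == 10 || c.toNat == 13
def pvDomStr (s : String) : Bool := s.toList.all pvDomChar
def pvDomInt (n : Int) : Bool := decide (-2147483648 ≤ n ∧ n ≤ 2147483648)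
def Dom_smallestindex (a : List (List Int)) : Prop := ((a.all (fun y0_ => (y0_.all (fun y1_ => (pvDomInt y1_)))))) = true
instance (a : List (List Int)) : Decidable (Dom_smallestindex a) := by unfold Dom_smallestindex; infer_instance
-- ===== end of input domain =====

-- B is one running-min pass instead of A's minima list plus rescan with min(b); equivalence is about the return value.

-- ===== PORT A =====
-- min(i) for a list of ints; Python raises ValueError on [], excluded by Pre_
def rowMin (r : List Int) : Int := (PySem.List.min? r (fun x => x)).getD 0

-- the second loop of A: k counts, breaks when j == min(b) (b passed whole, as in Python)
def smallestindexLoop (b' : List Int) (b : List Int) (k : Int) : Int :=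
  match b' with
  | [] => k
  | j :: rest => if j == rowMin b then k else smallestindexLoop rest b (k + 1)

def smallestindex (a : List (List Int)) : Int :=
  let b := a.map rowMin
  smallestindexLoop b b 0

-- ===== PORT B =====
def smallestindexAltLoop (rows : List (List Int)) (i : Int) (bv : Option Int) (bi : Int) : Int :=
  match rows with
  | [] => bi
  | row :: rest =>
    let m := rowMin row
    match bv with
    | none => smallestindexAltLoop rest (i + 1) (some m) i
    | some v =>
      if m < v then smallestindexAltLoop rest (i + 1) (some m) i
      else smallestindexAltLoop rest (i + 1) (some v) bi

def smallestindex_alt (a : List (List Int)) : Int :=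
  smallestindexAltLoop a 0 none 0

-- ===== PRECONDITION & SPEC =====
-- Pre_ excludes inputs containing an empty row, where Python's min([]) raises ValueError (in A and in B alike).
def Pre_smallestindex (a : List (List Int)) : Prop := ∀ r ∈ a, r ≠ []
instance (a : List (List Int)) : Decidable (Pre_smallestindex a) := by unfold Pre_smallestindex; infer_instance
def pvWitness_smallestindex : List (List Int) := [[3, 1], [0, 2], [0]]

def Spec_smallestindex (a : List (List Int)) (out : Int) : Prop := out = smallestindex_alt a
instance (a : List (List Int)) (out : Int) : Decidable (Spec_smallestindex a out) := by unfold Spec_smallestindex; infer_instance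

-- ===== CLAIM (what is proved, stated in full; the proofs are below) =====
def Claim_equal_smallestindex : Prop := ∀ (a : List (List Int)), Dom_smallestindex a → Pre_smallestindex a → Spec_smallestindex a (smallestindex a)

-- ===== LEMMAS AND PROOFS =====

-- reference function: first index of the global minimum
def idxMin : List Int → Int
  | [] => 0
  | x :: t => if t.all (fun y => x ≤ y) then 0 else 1 + idxMin t

lemma foldl_min_cons (t : List Int) : ∀ x y : Int, t.foldl min (min x y) = min x (t.foldl min y) := by
  induction t with
  | nil => intro x y; simp
  | cons z t ih =>
    intro x y
    simp only [List.foldl_cons]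
    rw [min_assoc, ih]

lemma rowMin_cons (x : Int) (t : List Int) : rowMin (x :: t) = t.foldl min x := by
  simp [rowMin, PySem.List.min?_id_cons]

lemma foldl_min_le_self (t : List Int) (x : Int) : t.foldl min x ≤ x :=
  (PySem.List.foldl_min_le t x).1

lemma foldl_min_le_mem (t : List Int) (x : Int) : ∀ y ∈ t, t.foldl min x ≤ y :=
  (PySem.List.foldl_min_le t x).2

lemma foldl_min_of_le (t : List Int) (x : Int) (h : ∀ y ∈ t, x ≤ y) : t.foldl min x = x := by
  rcases PySem.List.foldl_min_mem t x with h1 | h1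
  · exact h1
  · exact le_antisymm (foldl_min_le_self t x) (h _ h1)

-- A's scan loop: k plus the first index where min(b) appears (length if absent)
lemma loopA_eq (b : List Int) : ∀ (b' : List Int) (k : Int),
    smallestindexLoop b' b k = k + (b'.findIdx (fun j => j == rowMin b) : Int) := by
  intro b'
  induction b' with
  | nil => intro k; simp [smallestindexLoop]
  | cons j rest ih =>
    intro k
    simp only [smallestindexLoop, List.findIdx_cons]
    by_cases h : (j == rowMin b) = true
    · simp [h]
    · simp only [h, ih, cond_false]
      push_cast
      ring

lemma rowMin_le (x : Int) (t : List Int) : ∀ y ∈ x :: t, rowMin (x :: t) ≤ y := by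
  rw [rowMin_cons]
  intro y hy
  rcases List.mem_cons.mp hy with rfl | h
  · exact foldl_min_le_self t y
  · exact foldl_min_le_mem t x y h

-- first index of min(b) in b is idxMin b, for nonempty b
lemma findIdx_min_eq_idxMin : ∀ (x : Int) (t : List Int),
    ((x :: t).findIdx (fun j => j == rowMin (x :: t)) : Int) = idxMin (x :: t) := by
  intro x t
  induction t generalizing x with
  | nil => simp [idxMin, rowMin_cons, List.findIdx_cons]
  | cons h t' ih =>
    by_cases hall : ((h :: t').all (fun y => x ≤ y)) = true
    · have hfold : (h :: t').foldl min x = x := by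
        apply foldl_min_of_le
        intro y hy
        exact of_decide_eq_true (List.all_eq_true.mp hall y hy)
      simp [idxMin, hall, rowMin_cons, hfold, List.findIdx_cons]
    · have hex : ∃ y ∈ (h :: t'), y < x := by
        by_contra hc
        push_neg at hc
        exact hall (List.all_eq_true.mpr (fun y hy => decide_eq_true (hc y hy)))
      have htlt : rowMin (h :: t') < x := by
        rcases hex with ⟨y, hy, hlt⟩
        exact lt_of_le_of_lt (rowMin_le h t' y hy) hlt
      have htail : rowMin (x :: h :: t') = rowMin (h :: t') := by
        rw [rowMin_cons, List.foldl_cons, foldl_min_cons, ← rowMin_cons]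
        exact min_eq_right htlt.le
      have hne : ¬ (x == rowMin (x :: h :: t')) = true := by
        rw [htail]
        simp only [beq_iff_eq]
        omega
      rw [List.findIdx_cons]
      simp only [hne, cond_false]
      have hidx : idxMin (x :: h :: t') = 1 + idxMin (h :: t') := by
        rw [idxMin]; simp [hall]
      rw [hidx, htail]
      push_cast
      rw [ih h]
      ring

-- B's loop with a set best value: keeps bi if no later row-min beats v, else lands on the first global min
lemma altLoop_char : ∀ (rows : List (List Int)) (i v bi : Int),
    smallestindexAltLoop rows i (some v) bi =
      if ((rows.map rowMin).all (fun m => v ≤ m)) = true then bi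
      else i + idxMin (rows.map rowMin) := by
  intro rows
  induction rows with
  | nil => intro i v bi; simp [smallestindexAltLoop]
  | cons r rest ih =>
    intro i v bi
    simp only [smallestindexAltLoop, List.map_cons]
    by_cases hlt : rowMin r < v
    · rw [if_pos hlt, if_neg (by simp only [List.all_cons, Bool.and_eq_true, decide_eq_true_eq]; omega)]
      rw [ih]
      by_cases hall : ((rest.map rowMin).all (fun m => rowMin r ≤ m)) = true
      · rw [if_pos hall]
        simp [idxMin, hall]
      · rw [if_neg hall]
        simp only [idxMin, hall, if_neg, Bool.false_eq_true, not_false_eq_true]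
        ring
    · push_neg at hlt
      rw [if_neg (by omega), ih]
      by_cases hall : ((rest.map rowMin).all (fun m => v ≤ m)) = true
      · rw [if_pos hall, if_pos]
        simp only [List.all_cons, Bool.and_eq_true, decide_eq_true_eq]
        exact ⟨hlt, hall⟩
      · rw [if_neg hall, if_neg (by simp only [List.all_cons, Bool.and_eq_true]; tauto)]
        have hex : ∃ m ∈ rest.map rowMin, m < v := by
          by_contra hc
          push_neg at hc
          exact hall (List.all_eq_true.mpr (fun m hm => decide_eq_true (hc m hm)))
        have hhead : ¬ ((rest.map rowMin).all (fun y => rowMin r ≤ y)) = true := by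
          rcases hex with ⟨m, hm, hmv⟩
          intro hc
          have := of_decide_eq_true (List.all_eq_true.mp hc m hm)
          omega
        simp only [idxMin, hhead, if_neg, Bool.false_eq_true, not_false_eq_true]
        ring

-- ===== VERDICT (by name: the statement is the Claim_ definition above) =====
theorem smallestindex_spec : Claim_equal_smallestindex := by
  intro a _hDom _hPre
  unfold Spec_smallestindex smallestindex smallestindex_alt
  cases a with
  | nil => rfl
  | cons r rest =>
    simp only [List.map_cons]
    rw [loopA_eq]
    rw [findIdx_min_eq_idxMin (rowMin r) (rest.map rowMin)]
    show (0 : Int) + idxMin (rowMin r :: rest.map rowMin) = smallestindexAltLoop (r :: rest) 0 none 0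
    rw [zero_add]
    show idxMin (rowMin r :: rest.map rowMin) = smallestindexAltLoop rest 1 (some (rowMin r)) 0
    rw [altLoop_char]
    by_cases hall : ((rest.map rowMin).all (fun m => rowMin r ≤ m)) = true
    · simp [idxMin, hall]
    · rw [idxMin]
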